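-- pv_equiv track=rewrite | github.com/texrax/exhibitionserver | yolo/src/detector.py | _default_roles
-- ===== SOURCE A (Python) =====
-- from typing import Optional, List, Dict, Any, Union
--
-- def _default_roles(count: int) -> List[str]:
--     if count <= 1:
--         return ["general"]
--     if count == 2:
--         return ["general", "chopsticks"]
--     if count == 3:
--         return ["general", "chopsticks", "food"]
--     if count == 4:
--         return ["general", "chopsticks", "food", "bowl"]
--     return ["general"] + [f"custom_{idx}" for idx in range(1, count)]
-- ===== SOURCE B (Python) =====
-- def _role_name(idx, count):
--     if idx == 0:
--         return "general"
--     if count <= 4: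
--         return ("chopsticks", "food", "bowl")[idx - 1]
--     return f"custom_{idx}"
--
-- def _default_roles(count):
--     return [_role_name(i, count) for i in range(max(count, 1))]
-- ===== Notes on version B (the rewrite author's own statement) =====
-- stated objective: alternative
-- what changed: Generates the list in a single pass over indices range(max(count,1)) with a per-index name function (index 0 -> 'general', small counts index a fixed name tuple, large counts format 'custom_{idx}'), instead of A's four-way cascade returning whole literal lists plus a separate list concatenation.
import Mathlib
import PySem

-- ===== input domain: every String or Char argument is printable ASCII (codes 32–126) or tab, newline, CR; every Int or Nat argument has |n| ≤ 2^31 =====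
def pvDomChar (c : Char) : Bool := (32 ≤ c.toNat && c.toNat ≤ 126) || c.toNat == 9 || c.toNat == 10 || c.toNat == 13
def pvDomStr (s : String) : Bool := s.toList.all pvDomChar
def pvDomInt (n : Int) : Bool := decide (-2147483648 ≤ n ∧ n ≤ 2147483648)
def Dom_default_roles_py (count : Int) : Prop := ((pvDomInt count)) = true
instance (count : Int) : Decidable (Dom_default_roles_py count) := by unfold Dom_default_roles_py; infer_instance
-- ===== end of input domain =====

-- B builds the list in one pass over indices with a per-index name function, instead of A's branch cascade of whole literal lists; same cost, alternative decomposition.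

-- ===== PORT A =====
def default_roles_py (count : Int) : List String :=
  if count ≤ 1 then ["general"]
  else if count = 2 then ["general", "chopsticks"]
  else if count = 3 then ["general", "chopsticks", "food"]
  else if count = 4 then ["general", "chopsticks", "food", "bowl"]
  else ["general"] ++ (PySem.List.pyRange 1 count 1).map (fun idx => "custom_" ++ PySem.Int.toStr idx)

-- ===== PORT B =====
-- tuple indexing ("chopsticks","food","bowl")[idx-1]: exact via pyGet? (in B's use idx-1 is always in range 0..2, so getD "" is never taken)
def pvRoleName (idx count : Int) : String :=
  if idx = 0 then "general"
  else if count ≤ 4 then (PySem.List.pyGet? ["chopsticks", "food", "bowl"] (idx - 1)).getD ""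
  else "custom_" ++ PySem.Int.toStr idx

def default_roles_py_alt (count : Int) : List String :=
  (PySem.List.pyRange 0 (max count 1) 1).map (fun i => pvRoleName i count)

-- ===== PRECONDITION & SPEC =====
def Spec_default_roles_py (count : Int) (out : List String) : Prop := out = default_roles_py_alt count
instance (count : Int) (out : List String) : Decidable (Spec_default_roles_py count out) := by unfold Spec_default_roles_py; infer_instance

-- ===== CLAIM =====
def Claim_equal_default_roles_py : Prop := ∀ (count : Int), Dom_default_roles_py count → Spec_default_roles_py count (default_roles_py count)

-- ===== LEMMAS AND PROOFS =====

-- ===== VERDICT =====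
theorem default_roles_py_spec : Claim_equal_default_roles_py := by
  intro count _
  unfold Spec_default_roles_py default_roles_py default_roles_py_alt
  by_cases h1 : count ≤ 1
  · rw [if_pos h1, show max count 1 = 1 by omega,
        show PySem.List.pyRange 0 1 1 = [0] from by decide]
    simp [pvRoleName]
  · by_cases h2 : count = 2
    · subst h2; decide
    · by_cases h3 : count = 3
      · subst h3; decide
      · by_cases h4 : count = 4
        · subst h4; decide
        · have h5 : ¬ count ≤ 4 := by omega
          rw [if_neg h1, if_neg h2, if_neg h3, if_neg h4,
              show max count 1 = count by omega,
              PySem.List.pyRange_one_cons (by omega : (0:Int) < count),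
              List.map_cons]
          rw [show pvRoleName 0 count = "general" from by simp [pvRoleName]]
          refine congrArg _ ?_
          refine (List.map_congr_left ?_).symm
          intro x hx
          have hmem := (PySem.List.mem_pyRange_one).1 hx
          rw [pvRoleName, if_neg (by omega), if_neg h5]
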